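-- pv_equiv track=rewrite | github.com/shayangnala/outlier-patents | ipcscomb_future_usage_v1.py | one_elem_less_subset
-- ===== SOURCE A (Python) =====
-- from itertools import combinations
--
-- def one_elem_less_subset(orig_set):
-- 	if len(orig_set) == 1:
-- 		return []
--
-- 	l = list(combinations(orig_set, len(orig_set)-1))
--
-- 	result_str = []
-- 	for elem in l:
-- 		result_str.append(" ".join(sorted(elem)))
--
-- 	return result_str
-- ===== SOURCE B (Python) =====
-- def one_elem_less_subset(orig_set):
--     if len(orig_set) == 1:
--         return []
--     s = sorted(orig_set)
--     out = []
--     for x in reversed(orig_set):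
--         t = s.copy()
--         t.remove(x)
--         out.append(" ".join(t))
--     return out
-- ===== Notes on version B (the rewrite author's own statement) =====
-- stated objective: faster
-- what changed: Instead of enumerating all (n-1)-combinations and sorting each subset separately, B sorts the full list once and, for each element taken from last to first, emits the sorted list with one occurrence of that element removed.
import Mathlib
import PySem

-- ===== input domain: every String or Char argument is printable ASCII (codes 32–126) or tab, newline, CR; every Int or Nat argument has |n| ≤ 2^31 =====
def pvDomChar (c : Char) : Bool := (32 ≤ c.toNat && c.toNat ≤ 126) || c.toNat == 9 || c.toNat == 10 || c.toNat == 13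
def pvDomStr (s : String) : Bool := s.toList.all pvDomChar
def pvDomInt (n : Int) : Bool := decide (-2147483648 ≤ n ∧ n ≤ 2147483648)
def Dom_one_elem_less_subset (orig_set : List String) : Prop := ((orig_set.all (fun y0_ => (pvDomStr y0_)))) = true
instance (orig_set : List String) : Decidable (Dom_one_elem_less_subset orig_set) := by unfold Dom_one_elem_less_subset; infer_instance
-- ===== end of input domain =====

-- B sorts the input once and builds each leave-one-out line by deleting one element from the
-- sorted list (faster in a timing run); A re-sorts every (n-1)-combination separately.


-- ===== PORT A =====
-- itertools.combinations(xs, r) in its exact emission order (hand port; exact for r ≤ len(xs))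
def pvCombos : List String → Nat → List (List String)
  | _, 0 => [[]]
  | [], _ + 1 => []
  | x :: xs, r + 1 => ((pvCombos xs r).map (fun c => x :: c)) ++ pvCombos xs (r + 1)

def one_elem_less_subset (orig_set : List String) : List String :=
  if orig_set.length == 1 then []
  else
    let l := pvCombos orig_set (orig_set.length - 1)
    l.map (fun elem => PySem.Str.join " " (PySem.List.sorted elem (fun y => y) false))

-- ===== PORT B =====
def one_elem_less_subset_alt (orig_set : List String) : List String :=
  if orig_set.length == 1 then []
  else
    let s := PySem.List.sorted orig_set (fun y => y) false
    -- t.remove(x): x is always a member of s (s is a permutation of orig_set), so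
    -- remove? never returns none and the getD default is unreachable (no ValueError in Source B)
    orig_set.reverse.map (fun x => PySem.Str.join " " ((PySem.List.remove? s x).getD s))

-- ===== PRECONDITION & SPEC =====
-- A raises ValueError on the empty list (combinations with r = -1); everything else returns.
def Pre_one_elem_less_subset (orig_set : List String) : Prop := orig_set ≠ []
instance (orig_set : List String) : Decidable (Pre_one_elem_less_subset orig_set) := by unfold Pre_one_elem_less_subset; infer_instance
def pvWitness_one_elem_less_subset : List String := (["b", "a"])

def Spec_one_elem_less_subset (orig_set : List String) (out : List String) : Prop := out = one_elem_less_subset_alt orig_set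
instance (orig_set : List String) (out : List String) : Decidable (Spec_one_elem_less_subset orig_set out) := by unfold Spec_one_elem_less_subset; infer_instance

-- ===== CLAIM (what is proved, stated in full; the proofs are below) =====
def Claim_equal_one_elem_less_subset : Prop := ∀ (orig_set : List String), Dom_one_elem_less_subset orig_set → Pre_one_elem_less_subset orig_set → Spec_one_elem_less_subset orig_set (one_elem_less_subset orig_set)

-- ===== LEMMAS AND PROOFS =====

-- the leave-one-out list in combinations order: omit the LAST element first
def pvLoo : List String → List (List String)
  | [] => []
  | x :: xs => (pvLoo xs).map (fun c => x :: c) ++ [xs]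

theorem pvCombos_gt (ys : List String) : ∀ r, ys.length < r → pvCombos ys r = [] := by
  induction ys with
  | nil => intro r hr; cases r with
    | zero => omega
    | succ r => rfl
  | cons y ys ih =>
    intro r hr
    cases r with
    | zero => omega
    | succ r =>
      simp only [pvCombos]
      simp only [List.length_cons] at hr
      rw [ih r (by omega), ih (r + 1) (by omega)]
      simp

theorem pvCombos_full (ys : List String) : pvCombos ys ys.length = [ys] := by
  induction ys with
  | nil => rfl
  | cons y ys ih =>
    simp only [List.length_cons, pvCombos, ih, pvCombos_gt ys (ys.length + 1) (by omega)]
    simp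

theorem pvCombos_loo (xs : List String) (h : xs ≠ []) :
    pvCombos xs (xs.length - 1) = pvLoo xs := by
  induction xs with
  | nil => exact absurd rfl h
  | cons x xs ih =>
    cases xs with
    | nil => rfl
    | cons y ys =>
      have h2 : pvCombos (y :: ys) ys.length = pvLoo (y :: ys) := by
        have := ih (by simp)
        simpa using this
      have h3 : pvCombos (y :: ys) (ys.length + 1) = [y :: ys] := by
        simpa using pvCombos_full (y :: ys)
      show (pvCombos (y :: ys) ys.length).map (fun c => x :: c)
            ++ pvCombos (y :: ys) (ys.length + 1) = _
      rw [h2, h3]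
      rfl

-- deleting one occurrence of x from the sorted full list = sorting the list without that occurrence
theorem pvErase_sorted (l1 l2 : List String) (x : String) :
    (PySem.List.sorted (l1 ++ x :: l2) (fun y => y) false).erase x
      = PySem.List.sorted (l1 ++ l2) (fun y => y) false := by
  set s := PySem.List.sorted (l1 ++ x :: l2) (fun y => y) false with hs
  have hx : x ∈ s := by
    rw [hs, PySem.List.mem_sorted]; simp
  have hs2 : s.Perm (l1 ++ x :: l2) := PySem.List.sorted_perm _ _ _
  have h1 : (x :: s.erase x).Perm (x :: (l1 ++ l2)) :=
    (List.perm_cons_erase hx).symm.trans (hs2.trans List.perm_middle)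
  have hperm : (s.erase x).Perm (l1 ++ l2) := h1.cons_inv
  have hpw : (s.erase x).Pairwise (fun a b => a ≤ b) := by
    have hp := PySem.List.sorted_pairwise (l1 ++ x :: l2) (fun y => y)
    exact List.Pairwise.sublist List.erase_sublist (hs ▸ hp)
  exact (PySem.List.sorted_id_eq_of_perm_of_pairwise _ _ hperm hpw).symm

theorem pvLoo_sorted (xs : List String) : ∀ pre : List String,
    (pvLoo xs).map (fun c => PySem.List.sorted (pre ++ c) (fun y => y) false)
      = xs.reverse.map (fun x => (PySem.List.sorted (pre ++ xs) (fun y => y) false).erase x) := by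
  induction xs with
  | nil => intro pre; rfl
  | cons x xs ih =>
    intro pre
    simp only [pvLoo, List.map_append, List.map_map, List.reverse_cons, List.map_cons, List.map_nil]
    rw [show (fun c => PySem.List.sorted (pre ++ c) (fun y => y) false) ∘ (fun c => x :: c)
          = fun c => PySem.List.sorted ((pre ++ [x]) ++ c) (fun y => y) false from by
        funext c; simp]
    rw [ih (pre ++ [x])]
    have hpx : pre ++ [x] ++ xs = pre ++ x :: xs := by simp
    rw [hpx, pvErase_sorted pre xs x]

-- ===== VERDICT (by name: the statement is the Claim_ definition above) =====
theorem one_elem_less_subset_spec : Claim_equal_one_elem_less_subset := by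
  intro orig_set _ hpre
  unfold Spec_one_elem_less_subset one_elem_less_subset one_elem_less_subset_alt
  by_cases h1 : orig_set.length == 1
  · simp [h1]
  · simp only [h1]
    rw [pvCombos_loo orig_set hpre]
    have hmem : ∀ x ∈ orig_set.reverse,
        (PySem.List.remove? (PySem.List.sorted orig_set (fun y => y) false) x).getD
            (PySem.List.sorted orig_set (fun y => y) false)
          = (PySem.List.sorted orig_set (fun y => y) false).erase x := by
      intro x hx
      rw [PySem.List.remove?_eq_some_erase]
      · rfl
      · rw [PySem.List.mem_sorted]; exact List.mem_reverse.mp hx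
    calc (pvLoo orig_set).map
          (fun elem => PySem.Str.join " " (PySem.List.sorted elem (fun y => y) false))
        = ((pvLoo orig_set).map (fun c => PySem.List.sorted c (fun y => y) false)).map
            (PySem.Str.join " ") := by rw [List.map_map]; rfl
      _ = (orig_set.reverse.map
            (fun x => (PySem.List.sorted orig_set (fun y => y) false).erase x)).map
            (PySem.Str.join " ") := by
            have := pvLoo_sorted orig_set []
            simp only [List.nil_append] at this
            rw [this]
      _ = _ := by
            rw [List.map_map]
            exact (List.map_congr_left (fun x hx => by
              simp only [Function.comp]; rw [hmem x hx])).symm
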